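-- pv_equiv track=rewrite | github.com/Zihad07/Coding_for_Job_Interview | Array_01/03_is_one_array_rotaion_of_another.py | isRotaion
-- ===== SOURCE A (Python) =====
-- def isRotaion(A,B):
--     len_A = len(A)
--     len_B = len(B)
--
--     if len_A != len_B:
--         return False
--
--     key = A[0]
--     key_index = -1
--
--
--     for i in range(len_B):
--         if key == B[i]:
--             key_index = i
--             break
--
--     if key_index == -1:
--         return False
--
--     for i in range(len_A):
--         j = (key_index + i) % len_A
--
--         if A[i] != B[j]:
--             return False
--
--     # other wise
--     return True # the one array is rotation other array
-- ===== SOURCE B (Python) =====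
-- def isRotaion(A, B):
--     if len(A) != len(B):
--         return False
--     key = A[0]
--     try:
--         key_index = B.index(key)
--     except ValueError:
--         return False
--     return A == B[key_index:] + B[:key_index]
-- ===== Notes on version B (the rewrite author's own statement) =====
-- stated objective: simpler
-- what changed: Replaces the element-wise modular-index verification loop with building the rotated list B[k:]+B[:k] once (k found by B.index) and comparing it wholesale to A.
import Mathlib
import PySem

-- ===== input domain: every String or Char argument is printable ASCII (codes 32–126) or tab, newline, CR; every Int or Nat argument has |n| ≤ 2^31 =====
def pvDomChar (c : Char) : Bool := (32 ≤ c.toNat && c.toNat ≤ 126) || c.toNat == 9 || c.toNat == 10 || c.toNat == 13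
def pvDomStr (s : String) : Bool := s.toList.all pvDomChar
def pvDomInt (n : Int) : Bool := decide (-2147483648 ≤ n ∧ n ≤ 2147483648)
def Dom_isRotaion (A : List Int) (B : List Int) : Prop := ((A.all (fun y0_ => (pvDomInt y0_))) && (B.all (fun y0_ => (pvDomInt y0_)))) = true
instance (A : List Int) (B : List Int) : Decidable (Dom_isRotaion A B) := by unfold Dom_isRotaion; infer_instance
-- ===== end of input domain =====

-- B builds the rotated list B[k:]+B[:k] once (k = B.index(A[0])) and compares it wholesale,
-- instead of A's element-wise modular-index loop; same first-occurrence behaviour.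


-- ===== PORT A =====
-- first loop of A: scan B with a running index i, return the first i with key == B[i], else -1
def aFindKey (key : Int) (B : List Int) (i : Nat) : Int :=
  match B with
  | [] => -1
  | b :: rest => if key == b then (i : Int) else aFindKey key rest (i + 1)

-- second loop of A: for i in range(lenA): j = (key_index+i) % lenA; compare A[i], B[j]
-- (indices i and j are always in range here, so getD is exact for the Python indexing)
def aCheck (A B : List Int) (kix n i : Nat) : Bool :=
  if i < n then
    if A.getD i 0 ≠ B.getD ((kix + i) % n) 0 then false
    else aCheck A B kix n (i + 1)
  else true
termination_by n - i

def isRotaion (A : List Int) (B : List Int) : Bool :=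
  if A.length ≠ B.length then false
  else
    match PySem.List.pyGet? A 0 with   -- A[0]; none = IndexError, excluded by Pre_
    | none => false
    | some key =>
      let keyIndex := aFindKey key B 0
      if keyIndex == -1 then false
      else aCheck A B keyIndex.toNat A.length 0

-- ===== PORT B =====
def isRotaion_alt (A : List Int) (B : List Int) : Bool :=
  if A.length ≠ B.length then false
  else
    match PySem.List.pyGet? A 0 with   -- A[0]; none = IndexError, excluded by Pre_
    | none => false
    | some key =>
      match PySem.List.index? B key with   -- B.index(key); none = ValueError caught → False
      | none => false
      | some k =>
        A == PySem.List.slice B (some (k : Int)) none ++ PySem.List.slice B none (some (k : Int))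

-- ===== PRECONDITION & SPEC =====
-- Pre_ excludes only ([], []), where the Python A (and B alike) raises IndexError at A[0].
def Pre_isRotaion (A : List Int) (B : List Int) : Prop := ¬ (A = [] ∧ B = [])
instance (A : List Int) (B : List Int) : Decidable (Pre_isRotaion A B) := by unfold Pre_isRotaion; infer_instance
def pvWitness_isRotaion : List Int × List Int := ([1, 2, 3], [3, 1, 2])

def Spec_isRotaion (A : List Int) (B : List Int) (out : Bool) : Prop := out = isRotaion_alt A B
instance (A : List Int) (B : List Int) (out : Bool) : Decidable (Spec_isRotaion A B out) := by unfold Spec_isRotaion; infer_instance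

-- ===== CLAIM (what is proved, stated in full; the proofs are below) =====
def Claim_equal_isRotaion : Prop := ∀ (A : List Int) (B : List Int), Dom_isRotaion A B → Pre_isRotaion A B → Spec_isRotaion A B (isRotaion A B)

-- ===== LEMMAS AND PROOFS =====

-- A's first loop computes index? shifted by the starting counter
theorem aFindKey_eq (key : Int) (B : List Int) (i : Nat) :
    aFindKey key B i = match PySem.List.index? B key with
      | none => -1
      | some k => ((i + k : Nat) : Int) := by
  induction B generalizing i with
  | nil => simp [aFindKey, PySem.List.index?]
  | cons b rest ih =>
    by_cases h : key = b
    · subst h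
      rw [PySem.List.index?_cons_self]
      simp [aFindKey]
    · rw [PySem.List.index?_cons_of_ne rest (Ne.symm h)]
      rw [show aFindKey key (b :: rest) i = aFindKey key rest (i + 1) from by
        simp [aFindKey, h], ih]
      cases hk : PySem.List.index? rest key with
      | none => simp
      | some v =>
        simp only [Option.map_some]
        push_cast
        ring

-- A's second loop is the pointwise condition from its current index on
theorem aCheck_iff (A B : List Int) (kix n : Nat) (i : Nat) :
    aCheck A B kix n i = true ↔
      ∀ m, i ≤ m → m < n → A.getD m 0 = B.getD ((kix + m) % n) 0 := by
  induction hfuel : n - i using Nat.strong_induction_on generalizing i with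
  | _ fuel ih =>
    rw [aCheck]
    by_cases h : i < n
    · rw [if_pos h]
      by_cases he : A.getD i 0 = B.getD ((kix + i) % n) 0
      · rw [if_neg (by simpa using he), ih (n - (i+1)) (by omega) (i+1) rfl]
        constructor
        · intro hall m him hmn
          rcases Nat.eq_or_lt_of_le him with rfl | hlt
          · exact he
          · exact hall m hlt hmn
        · intro hall m him hmn; exact hall m (by omega) hmn
      · rw [if_pos (by simpa using he)]
        constructor
        · intro hf; exact (Bool.false_ne_true hf).elim
        · intro hall; exact absurd (hall i le_rfl h) he
    · rw [if_neg h]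
      constructor
      · intro _ m him hmn; omega
      · intro _; rfl

-- the rotated list equals A iff the pointwise modular condition holds
theorem rot_iff (A B : List Int) (n k : Nat) (hA : A.length = n) (hB : B.length = n)
    (hk : k < n) :
    (A = B.drop k ++ B.take k) ↔
      ∀ m, 0 ≤ m → m < n → A.getD m 0 = B.getD ((k + m) % n) 0 := by
  have hn : 0 < n := by omega
  have hlen : (B.drop k ++ B.take k).length = n := by
    rw [List.length_append, List.length_drop, List.length_take]; omega
  have hgd : ∀ m, m < n → (B.drop k ++ B.take k).getD m 0 = B.getD ((k + m) % n) 0 := by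
    intro m hmn
    have hjlt : (k + m) % n < n := Nat.mod_lt _ hn
    rw [List.getD_eq_getElem _ _ (by omega : m < (B.drop k ++ B.take k).length),
        List.getD_eq_getElem _ _ (by omega : (k + m) % n < B.length)]
    by_cases hc : m < n - k
    · have hmod : (k + m) % n = k + m := Nat.mod_eq_of_lt (by omega)
      rw [List.getElem_append_left (by rw [List.length_drop]; omega)]
      rw [List.getElem_drop]
      congr 1
      omega
    · have hmod : (k + m) % n = k + m - n := by
        rw [Nat.mod_eq_sub_mod (by omega), Nat.mod_eq_of_lt (by omega)]
      rw [List.getElem_append_right (by rw [List.length_drop]; omega)]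
      rw [List.getElem_take]
      congr 1
      rw [List.length_drop, hB, hmod]
      omega
  constructor
  · intro hEq m _ hmn
    rw [hEq, hgd m hmn]
  · intro hall
    apply List.ext_getElem (by omega)
    intro m hm1 hm2
    have h1 := hall m (Nat.zero_le m) (by omega)
    rw [List.getD_eq_getElem _ _ hm1] at h1
    have h2 := hgd m (by omega)
    rw [List.getD_eq_getElem _ _ hm2] at h2
    exact h1.trans h2.symm

-- ===== VERDICT (by name: the statement is the Claim_ definition above) =====
theorem isRotaion_spec : Claim_equal_isRotaion := by
  intro A B _ _
  unfold Spec_isRotaion isRotaion isRotaion_alt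
  by_cases hlen : A.length = B.length
  · rw [if_neg (by simpa using hlen), if_neg (by simpa using hlen)]
    cases hA : PySem.List.pyGet? A 0 with
    | none => rfl
    | some key =>
      cases hidx : PySem.List.index? B key with
      | none =>
        simp only [aFindKey_eq, hidx]
        rfl
      | some k =>
        simp only [aFindKey_eq, hidx, Nat.zero_add]
        obtain ⟨hk, -, -⟩ := PySem.List.getElem_of_index?_eq_some hidx
        have hkn : k < A.length := by omega
        rw [if_neg (by simp)]
        rw [PySem.List.slice_from_natCast, PySem.List.slice_to_natCast]
        have h1 : ((k : Nat) : Int).toNat = k := by simp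
        rw [h1]
        have hriff := rot_iff A B A.length k rfl hlen.symm hkn
        by_cases hrot : A = B.drop k ++ B.take k
        · rw [beq_iff_eq.mpr hrot]
          rw [aCheck_iff]
          intro m _ hm
          exact hriff.mp hrot m (Nat.zero_le m) hm
        · rw [beq_eq_false_iff_ne.mpr hrot]
          have h2 : ¬ aCheck A B k A.length 0 = true := by
            rw [aCheck_iff]
            intro hall
            exact hrot (hriff.mpr (fun m _ hm => hall m (Nat.zero_le m) hm))
          exact Bool.eq_false_iff.mpr h2
  · rw [if_pos (by simpa using hlen), if_pos (by simpa using hlen)]
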